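-- pv_equiv track=rewrite | github.com/hlibbabii/log-recommender | log_recommender/log_statement.py | merge_tabs
-- ===== SOURCE A (Python) =====
-- def merge_tabs(lst):
--     res = []
--     count = 0
--     for word in lst:
--         if word == '\t':
--             count += 1
--         else:
--             if count != 0:
--                 res.append('\t' + str(count))
--                 count = 0
--             res.append(word)
--     if count != 0:
--         res.append('\t' + str(count))
--     return res
-- ===== SOURCE B (Python) =====
-- def merge_tabs(lst):
--     # Run-scan: find each maximal run of tabs at once and emit its length;
--     # non-tab words are copied through one by one. No pending-counter state.
--     res = []
--     i = 0
--     n = len(lst)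
--     while i < n:
--         if lst[i] == '\t':
--             j = i
--             while j < n and lst[j] == '\t':
--                 j += 1
--             res.append('\t' + str(j - i))
--             i = j
--         else:
--             res.append(lst[i])
--             i += 1
--     return res
-- ===== Notes on version B (the rewrite author's own statement) =====
-- stated objective: alternative
-- what changed: Replaces A's running tab-counter with boundary/post-loop flushes by a run-scan that consumes each maximal tab run at once and emits its length directly, so no pending state or final flush exists.
import Mathlib
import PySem

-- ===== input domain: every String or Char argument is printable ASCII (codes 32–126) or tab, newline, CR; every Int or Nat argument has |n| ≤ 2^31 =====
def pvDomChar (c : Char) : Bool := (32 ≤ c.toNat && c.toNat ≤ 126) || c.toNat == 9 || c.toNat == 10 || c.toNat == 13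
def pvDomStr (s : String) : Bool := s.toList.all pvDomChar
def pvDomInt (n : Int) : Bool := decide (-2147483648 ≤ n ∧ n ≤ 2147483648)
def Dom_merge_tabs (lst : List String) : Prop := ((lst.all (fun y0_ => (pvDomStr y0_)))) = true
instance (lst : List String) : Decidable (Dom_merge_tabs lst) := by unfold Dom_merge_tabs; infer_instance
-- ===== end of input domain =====

-- B replaces A's running tab-counter with flushes by a run-scan that consumes each
-- maximal tab run at once and emits its length (alternative decomposition, same cost).


-- ===== PORT A =====
-- the for-loop of A, carrying (res, count) exactly as the Python does
def mtLoopA : List String → List String → Int → List String × Int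
  | [], res, count => (res, count)
  | w :: rest, res, count =>
    if w = "\t" then mtLoopA rest res (count + 1)
    else if count ≠ 0 then mtLoopA rest (res ++ ["\t" ++ PySem.Int.toStr count, w]) 0
    else mtLoopA rest (res ++ [w]) 0

def merge_tabs (lst : List String) : List String :=
  let p := mtLoopA lst [] 0
  if p.2 ≠ 0 then p.1 ++ ["\t" ++ PySem.Int.toStr p.2] else p.1

-- ===== PORT B =====
-- run-scan: a maximal tab run is consumed at once (takeWhile/dropWhile = B's inner while)
def mtRuns : List String → List String
  | [] => []
  | w :: rest =>
    if w = "\t" then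
      ("\t" ++ PySem.Int.toStr (1 + (rest.takeWhile (· = "\t")).length))
        :: mtRuns (rest.dropWhile (· = "\t"))
    else
      w :: mtRuns rest
termination_by l => l.length
decreasing_by
  · simpa using Nat.lt_succ_of_le (List.length_dropWhile_le _ _)
  · simp

def merge_tabs_alt (lst : List String) : List String := mtRuns lst

-- ===== PRECONDITION & SPEC =====
def Spec_merge_tabs (lst : List String) (out : List String) : Prop := out = merge_tabs_alt lst
instance (lst : List String) (out : List String) : Decidable (Spec_merge_tabs lst out) := by unfold Spec_merge_tabs; infer_instance

-- ===== CLAIM (what is proved, stated in full; the proofs are below) =====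
def Claim_equal_merge_tabs : Prop := ∀ (lst : List String), Dom_merge_tabs lst → Spec_merge_tabs lst (merge_tabs lst)

-- ===== LEMMAS AND PROOFS =====

theorem takeWhile_tabs (k : ℕ) (w : String) (rest : List String) (hw : w ≠ "\t") :
    List.takeWhile (· = "\t") (List.replicate k "\t" ++ w :: rest) = List.replicate k "\t" := by
  induction k with
  | zero => simp [hw]
  | succ j ih => simp [List.replicate_succ, ih]

theorem dropWhile_tabs (k : ℕ) (w : String) (rest : List String) (hw : w ≠ "\t") :
    List.dropWhile (· = "\t") (List.replicate k "\t" ++ w :: rest) = w :: rest := by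
  induction k with
  | zero => simp [hw]
  | succ j ih => simp [List.replicate_succ, ih]

theorem mtRuns_tab_run (n : ℕ) (w : String) (rest : List String) (hw : w ≠ "\t") :
    mtRuns (List.replicate n "\t" ++ w :: rest)
      = (if n = 0 then [] else ["\t" ++ PySem.Int.toStr (n : Int)]) ++ w :: mtRuns rest := by
  cases n with
  | zero => simp [mtRuns, hw]
  | succ m =>
    rw [List.replicate_succ, List.cons_append, mtRuns]
    simp [takeWhile_tabs m w rest hw, dropWhile_tabs m w rest hw, mtRuns, hw]
    rw [Int.add_comm]

theorem mtRuns_all_tabs (n : ℕ) :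
    mtRuns (List.replicate n "\t")
      = (if n = 0 then [] else ["\t" ++ PySem.Int.toStr (n : Int)]) := by
  cases n with
  | zero => simp [mtRuns]
  | succ m =>
    rw [List.replicate_succ, mtRuns]
    simp [mtRuns]
    rw [Int.add_comm]

-- main invariant: A's loop + final flush, from pending count c, equals B on c tabs prepended
theorem mtLoopA_invariant (lst : List String) :
    ∀ (res : List String) (c : ℕ),
      (let p := mtLoopA lst res (c : Int)
       if p.2 ≠ 0 then p.1 ++ ["\t" ++ PySem.Int.toStr p.2] else p.1)
        = res ++ mtRuns (List.replicate c "\t" ++ lst) := by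
  induction lst with
  | nil =>
    intro res c
    cases c with
    | zero => simp [mtLoopA, mtRuns]
    | succ m =>
      have hc : ((m : Int) + 1) ≠ 0 := by omega
      have := mtRuns_all_tabs (m + 1)
      push_cast at this ⊢
      simp [mtLoopA, hc, this]
  | cons w rest ih =>
    intro res c
    by_cases hw : w = "\t"
    · subst hw
      have hstep : mtLoopA ("\t" :: rest) res (c : Int) = mtLoopA rest res ((c : Int) + 1) := by
        simp [mtLoopA]
      have h := ih res (c + 1)
      push_cast at h
      have hrep : List.replicate c "\t" ++ "\t" :: rest
          = List.replicate (c + 1) "\t" ++ rest := by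
        simp [List.replicate_succ']
      rw [hrep]
      simp only [hstep]
      exact h
    · cases c with
      | zero =>
        have hstep : mtLoopA (w :: rest) res (0 : Int) = mtLoopA rest (res ++ [w]) 0 := by
          simp [mtLoopA, hw]
        have h := ih (res ++ [w]) 0
        push_cast at h ⊢
        simp only [hstep]
        simpa [mtRuns, hw, List.append_assoc] using h
      | succ m =>
        have hc : ((m : Int) + 1) ≠ 0 := by omega
        have hstep : mtLoopA (w :: rest) res ((m : Int) + 1)
            = mtLoopA rest (res ++ ["\t" ++ PySem.Int.toStr ((m : Int) + 1), w]) 0 := by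
          simp [mtLoopA, hw, hc]
        have h := ih (res ++ ["\t" ++ PySem.Int.toStr ((m : Int) + 1), w]) 0
        push_cast at h ⊢
        simp only [hstep]
        rw [mtRuns_tab_run (m + 1) w rest hw]
        push_cast
        simpa [List.append_assoc] using h

-- ===== VERDICT (by name: the statement is the Claim_ definition above) =====
theorem merge_tabs_spec : Claim_equal_merge_tabs := by
  intro lst _
  have h := mtLoopA_invariant lst [] 0
  simpa [merge_tabs, merge_tabs_alt, Spec_merge_tabs] using h
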